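-- pv_equiv track=rewrite | github.com/RascalTwo/DailyProblem | problems/DailyCoding/041/solve.py | compute_itinerary
-- ===== SOURCE A (Python) =====
-- from typing import Iterable, List, Optional, Tuple
--
-- def compute_itinerary(flights: List[Tuple[str, str]], origin: str) -> Iterable[List[str]]:
-- 	next_flights = [flight for flight in flights if flight[0] == origin]
-- 	if next_flights == flights:
-- 		yield from [[flights[0][1]]]
-- 		return
--
-- 	for next_flight in next_flights:
-- 		yield from [
-- 			[next_flight[1], *branch]
-- 			for branch in compute_itinerary([flight for flight in flights if flight != next_flight], next_flight[1])
-- 		]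
-- ===== SOURCE B (Python) =====
-- def compute_itinerary(flights, origin):
--     # Iterative explicit-stack DFS instead of A's recursive generator.
--     stack = [(flights, origin, [])]
--     while stack:
--         rem, org, pre = stack.pop()
--         if all(f[0] == org for f in rem):
--             yield pre + [rem[0][1]]
--         else:
--             children = [f for f in rem if f[0] == org]
--             for fl in reversed(children):
--                 stack.append((
--                     [f for f in rem if f != fl],
--                     fl[1],
--                     pre + [fl[1]],
--                 ))
-- ===== Notes on version B (the rewrite author's own statement) =====
-- stated objective: alternative
-- what changed: Replaces A's recursive generator with a single iterative explicit-stack DFS worklist carrying (remaining-flights, current-origin, prefix) frames; children are pushed in reversed order so pop order reproduces A's left-to-right yield order.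
import Mathlib
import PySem

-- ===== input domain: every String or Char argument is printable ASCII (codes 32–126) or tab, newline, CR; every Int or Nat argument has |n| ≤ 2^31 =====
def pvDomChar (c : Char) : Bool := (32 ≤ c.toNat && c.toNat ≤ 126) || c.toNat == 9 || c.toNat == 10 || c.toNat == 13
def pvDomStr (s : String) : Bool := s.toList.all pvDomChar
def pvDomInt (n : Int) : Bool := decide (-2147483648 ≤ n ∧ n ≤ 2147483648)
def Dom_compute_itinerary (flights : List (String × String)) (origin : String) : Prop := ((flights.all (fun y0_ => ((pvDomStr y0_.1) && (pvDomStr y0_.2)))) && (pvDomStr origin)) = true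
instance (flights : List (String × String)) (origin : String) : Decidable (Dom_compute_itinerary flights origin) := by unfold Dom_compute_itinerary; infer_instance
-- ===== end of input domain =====

-- B replaces A's recursive generator by an iterative explicit-stack DFS worklist (alternative decomposition, same output order).

-- ===== PORT A =====

-- helper cited by both ports' termination proofs: removing a present element strictly shrinks a list

theorem pvFilterNeLtLength (l : List (String × String)) (x : String × String) (hx : x ∈ l) :
    (l.filter (fun f => decide (f ≠ x))).length < l.length := by
  induction l with
  | nil => cases hx
  | cons a t ih =>
    by_cases hax : a = x
    · subst hax
      simp only [List.filter, ne_eq, decide_not, not_true_eq_false, decide_false]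
      calc (t.filter (fun f => !decide (f = a))).length ≤ t.length := List.length_filter_le _ _
        _ < (a :: t).length := by simp
    · have hxt : x ∈ t := by cases hx with
        | head => exact absurd rfl hax
        | tail _ h => exact h
      have := ih hxt
      simp only [List.filter, ne_eq, decide_not]
      simp only [hax, decide_false, Bool.not_false, List.length_cons]
      simp only [ne_eq, decide_not] at this
      omega

-- rewrites the attach/unattach form produced by well-founded-recursion preprocessing back to the plain filter (cited by the termination proofs)

theorem pvUnattachFilterNe (l : List (String × String)) (c : String × String) :
    (List.filter (fun x => decide ((x : {x // x ∈ l}).val ≠ c)) l.attach).unattach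
      = l.filter (fun f => decide (f ≠ c)) := by
  rw [List.unattach_filter (g := fun f => decide (f ≠ c)) (hf := fun a h => rfl)]
  simp

-- A's intermediate value `next_flights`, kept as a named helper

def pvNextFlights (flights : List (String × String)) (origin : String) :
    List (String × String) :=
  flights.filter (fun f => f.1 == origin)

-- Python A raises IndexError on flights == [] (flights[0]); there the port returns junk via headI (excluded by Pre_).

def compute_itinerary (flights : List (String × String)) (origin : String) : List (List String) :=
  if pvNextFlights flights origin = flights then
    [[flights.headI.2]]
  else
    (pvNextFlights flights origin).attach.flatMap (fun nf =>
      (compute_itinerary (flights.filter (fun f => decide (f ≠ nf.1))) nf.1.2).map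
        (fun branch => nf.1.2 :: branch))
termination_by flights.length
decreasing_by
  have h := nf.2
  unfold pvNextFlights at h
  simp only [pvUnattachFilterNe]
  exact pvFilterNeLtLength flights nf.1 (List.mem_of_mem_filter h)

-- ===== PORT B =====

-- termination measure for the worklist: pvMeas n bounds the work of a frame with n remaining flights

def pvMeas : Nat → Nat
  | 0 => 1
  | n + 1 => (n + 1) * pvMeas n + 1

theorem pvMeas_pos (n : Nat) : 0 < pvMeas n := by cases n <;> simp [pvMeas]

theorem pvMeas_mono {a b : Nat} (h : a ≤ b) : pvMeas a ≤ pvMeas b := by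
  induction b with
  | zero => simp_all
  | succ m ih =>
    rcases Nat.lt_or_ge a (m + 1) with hlt | hge
    · have h1 := ih (Nat.lt_succ_iff.mp hlt)
      have h2 : pvMeas m ≤ (m + 1) * pvMeas m + 1 := by nlinarith [pvMeas_pos m]
      calc pvMeas a ≤ pvMeas m := h1
        _ ≤ pvMeas (m + 1) := by simpa [pvMeas] using h2
    · have : a = m + 1 := le_antisymm h hge
      simp [this]

def pvStackMeas (stack : List (List (String × String) × String × List String)) : Nat :=
  (stack.map (fun fr => pvMeas fr.1.length)).sum

-- the child frames pushed for one popped frame (Source B's inline list comprehension)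

def pvChildren (rem : List (String × String)) (org : String) (pre : List String) :
    List (List (String × String) × String × List String) :=
  (rem.filter (fun f => f.1 == org)).map
    (fun fl => (rem.filter (fun f => decide (f ≠ fl)), fl.2, pre ++ [fl.2]))

-- cited by pvGo's termination proof: the children of a nonempty frame weigh strictly less than the frame

theorem pvChildrenMeas (rem : List (String × String)) (org : String) (pre : List String)
    (hne : rem ≠ []) : pvStackMeas (pvChildren rem org pre) < pvMeas rem.length := by
  have hbound : ∀ y ∈ (pvChildren rem org pre).map (fun fr => pvMeas fr.1.length),
      y ≤ pvMeas (rem.length - 1) := by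
    intro y hy
    simp only [pvChildren, List.map_map, List.mem_map, Function.comp] at hy
    obtain ⟨fl, hfl, rfl⟩ := hy
    have hmem : fl ∈ rem := List.mem_of_mem_filter hfl
    have hlt := pvFilterNeLtLength rem fl hmem
    exact pvMeas_mono (by omega)
  have hsum := List.sum_le_card_nsmul _ (pvMeas (rem.length - 1)) hbound
  have hlen : ((pvChildren rem org pre).map (fun fr => pvMeas fr.1.length)).length ≤ rem.length := by
    simp only [List.length_map, pvChildren]
    exact List.length_filter_le _ _
  have hml : pvMeas rem.length = rem.length * pvMeas (rem.length - 1) + 1 := by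
    obtain ⟨a, t, rfl⟩ := List.exists_cons_of_ne_nil hne
    simp [pvMeas]
  simp only [smul_eq_mul] at hsum
  have h2 : ((pvChildren rem org pre).map (fun fr => pvMeas fr.1.length)).sum
      ≤ rem.length * pvMeas (rem.length - 1) :=
    le_trans hsum (Nat.mul_le_mul_right _ hlen)
  unfold pvStackMeas
  omega

-- the iterative worklist: head of the list is the top of the Python stack
-- (Python pushes `reversed(children)`, so the in-order prepend here gives the same pop order)

def pvGo : List (List (String × String) × String × List String) → List (List String)
  | [] => []
  | (rem, org, pre) :: rest =>
    if rem.all (fun f => f.1 == org) then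
      (pre ++ [rem.headI.2]) :: pvGo rest
    else
      pvGo (pvChildren rem org pre ++ rest)
termination_by stack => pvStackMeas stack
decreasing_by
  · simp only [pvStackMeas, List.map_cons, List.sum_cons]
    have := pvMeas_pos rem.length
    omega
  · rename_i hall
    have hne : rem ≠ [] := by intro h; subst h; simp at hall
    have h1 := pvChildrenMeas rem org pre hne
    simp only [pvStackMeas, List.map_append, List.sum_append, List.map_cons, List.sum_cons] at *
    omega

def compute_itinerary_alt (flights : List (String × String)) (origin : String) : List (List String) :=
  pvGo [(flights, origin, [])]

-- ===== PRECONDITION & SPEC =====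
-- Pre_ excludes only flights = [], on which the Python A raises IndexError (flights[0]) when the generator is consumed.
def Pre_compute_itinerary (flights : List (String × String)) (origin : String) : Prop := flights ≠ []
instance (flights : List (String × String)) (origin : String) : Decidable (Pre_compute_itinerary flights origin) := by unfold Pre_compute_itinerary; infer_instance
def pvWitness_compute_itinerary : (List (String × String)) × String := ([("A", "B")], "A")

def Spec_compute_itinerary (flights : List (String × String)) (origin : String) (out : List (List String)) : Prop := out = compute_itinerary_alt flights origin
instance (flights : List (String × String)) (origin : String) (out : List (List String)) : Decidable (Spec_compute_itinerary flights origin out) := by unfold Spec_compute_itinerary; infer_instance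

-- ===== CLAIM (what is proved, stated in full; the proofs are below) =====
def Claim_equal_compute_itinerary : Prop := ∀ (flights : List (String × String)) (origin : String), Dom_compute_itinerary flights origin → Pre_compute_itinerary flights origin → Spec_compute_itinerary flights origin (compute_itinerary flights origin)

-- ===== LEMMAS AND PROOFS =====

theorem pvFlatMapAttachVal {α β : Type} (l : List α) (F : α → List β) :
    l.attach.flatMap (fun x => F x.val) = l.flatMap F := by
  calc l.attach.flatMap (fun x => F x.val)
      = (l.attach.map Subtype.val).flatMap F := (List.flatMap_map _ _ _).symm
    _ = l.flatMap F := by rw [List.attach_map_subtype_val]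

theorem pvGo_eq_flatMap (stack : List (List (String × String) × String × List String)) :
    pvGo stack = stack.flatMap
      (fun fr => (compute_itinerary fr.1 fr.2.1).map (fun b => fr.2.2 ++ b)) := by
  induction stack using pvGo.induct with
  | case1 => simp [pvGo]
  | case2 rem org pre rest hall ih =>
    rw [pvGo]
    simp only [hall, if_true]
    have hfe : pvNextFlights rem org = rem := by
      rw [pvNextFlights, List.filter_eq_self]
      exact List.all_eq_true.mp hall
    rw [List.flatMap_cons, compute_itinerary]
    rw [if_pos hfe]
    simp [ih]
  | case3 rem org pre rest hall ih =>
    rw [pvGo]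
    simp only [hall, Bool.false_eq_true, if_false]
    have hfe : ¬ (pvNextFlights rem org = rem) := by
      rw [pvNextFlights, List.filter_eq_self]
      intro h
      exact hall (List.all_eq_true.mpr h)
    rw [ih, List.flatMap_append, List.flatMap_cons]
    congr 1
    rw [compute_itinerary]
    rw [if_neg hfe]
    rw [List.map_flatMap]
    rw [pvFlatMapAttachVal (pvNextFlights rem org)
      (fun fl => ((compute_itinerary (List.filter (fun f => decide (f ≠ fl)) rem) fl.2).map
        (fun branch => fl.2 :: branch)).map (fun b => pre ++ b))]
    simp only [pvChildren, pvNextFlights, List.flatMap_map]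
    refine List.flatMap_congr ?_
    intro fl _
    simp only [List.map_map, Function.comp_def]
    refine List.map_congr_left ?_
    intro b _
    simp

-- ===== VERDICT (by name: the statement is the Claim_ definition above) =====
theorem compute_itinerary_spec : Claim_equal_compute_itinerary := by
  intro flights origin _ _
  show compute_itinerary flights origin = compute_itinerary_alt flights origin
  unfold compute_itinerary_alt
  rw [pvGo_eq_flatMap]
  simp
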